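-- pv_equiv track=rewrite | github.com/pbbcache/cachesim | simulator/common/simulator_core.py | number_of_solutions_partitioning_gen
-- ===== SOURCE A (Python) =====
-- def number_of_solutions_partitioning_gen(nr_ways,nr_partitions,count_intermediate):
-- 	assert nr_partitions<=nr_ways
--
-- 	if nr_partitions==1 or nr_ways==nr_partitions:
-- 		return 1
-- 	elif nr_ways==nr_partitions+1: ## Just one app can take the extra way...
-- 		return nr_partitions
-- 	else:
-- 		## Recursive case
-- 		total_solutions=1 if count_intermediate else 0
--
-- 		for i in range(1,nr_ways-(nr_partitions-1)+1):
-- 			total_solutions+=number_of_solutions_partitioning_gen(nr_ways-i,nr_partitions-1,count_intermediate)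
--
-- 		return total_solutions
-- ===== SOURCE B (Python) =====
-- def _binom(n, k):
--     if k < 0 or k > n:
--         return 0
--     res = 1
--     for i in range(1, k + 1):
--         res = res * (n - k + i) // i
--     return res
--
--
-- def number_of_solutions_partitioning_gen(nr_ways, nr_partitions, count_intermediate):
--     assert 1 <= nr_partitions <= nr_ways
--     total = _binom(nr_ways - 1, nr_partitions - 1)
--     if count_intermediate and nr_partitions >= 2 and nr_ways >= nr_partitions + 2:
--         total += _binom(nr_ways - 3, nr_partitions - 2)
--     return total
-- ===== Notes on version B (the rewrite author's own statement) =====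
-- stated objective: faster
-- what changed: Replaced the exponential tree recursion by a closed form: the count is the binomial C(nr_ways-1, nr_partitions-1) (compositions of nr_ways into nr_partitions positive parts), plus C(nr_ways-3, nr_partitions-2) for the intermediate nodes when count_intermediate is set; binomials are computed by a single multiplicative loop.
-- outside the precondition, e.g. on number_of_solutions_partitioning_gen(-3, -3, False): A returns 1, B raises AssertionError; on number_of_solutions_partitioning_gen(0, -1, False): A returns -1, B raises AssertionError
import Mathlib
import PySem

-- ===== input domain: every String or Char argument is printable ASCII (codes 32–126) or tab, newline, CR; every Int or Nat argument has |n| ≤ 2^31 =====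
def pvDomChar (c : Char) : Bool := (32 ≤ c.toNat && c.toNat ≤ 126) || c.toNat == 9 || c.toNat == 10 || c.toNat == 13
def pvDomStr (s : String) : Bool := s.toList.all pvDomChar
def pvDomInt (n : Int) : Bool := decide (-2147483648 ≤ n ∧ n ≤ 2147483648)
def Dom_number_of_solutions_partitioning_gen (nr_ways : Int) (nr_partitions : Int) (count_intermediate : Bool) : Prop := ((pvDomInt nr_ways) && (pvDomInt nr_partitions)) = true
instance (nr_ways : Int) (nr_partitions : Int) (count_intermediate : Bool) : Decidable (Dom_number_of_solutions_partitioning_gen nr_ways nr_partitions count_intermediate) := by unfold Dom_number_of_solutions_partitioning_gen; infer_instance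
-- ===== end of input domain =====

-- B replaces A's exponential recursion by a closed-form sum of two binomial coefficients (objective: faster, asymptotic).

-- ===== PORT A =====
-- A's recursion decreases nr_partitions by 1 at each level and bottoms out at nr_partitions = 1
-- (or nr_ways = nr_partitions), so on Pre_ (1 ≤ nr_partitions ≤ nr_ways) fuel nr_partitions.toNat
-- is exactly enough; for nr_partitions < 1 the Python recursion does not terminate (RecursionError).
def pvGoA (fuel : Nat) (nr_ways : Int) (nr_partitions : Int) (count_intermediate : Bool) : Int :=
  match fuel with
  | 0 => 0
  | Nat.succ f =>
    if nr_partitions = 1 ∨ nr_ways = nr_partitions then 1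
    else if nr_ways = nr_partitions + 1 then nr_partitions
    else
      (PySem.List.pyRange 1 (nr_ways - (nr_partitions - 1) + 1) 1).foldl
        (fun acc i => acc + pvGoA f (nr_ways - i) (nr_partitions - 1) count_intermediate)
        (if count_intermediate then 1 else 0)

def number_of_solutions_partitioning_gen (nr_ways : Int) (nr_partitions : Int) (count_intermediate : Bool) : Int :=
  pvGoA nr_partitions.toNat nr_ways nr_partitions count_intermediate

-- ===== PORT B =====
-- _binom of Source B: multiplicative loop, res = res * (n - k + i) // i
def pvBinom (n : Int) (k : Int) : Int :=
  if k < 0 ∨ n < k then 0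
  else
    (PySem.List.pyRange 1 (k + 1) 1).foldl
      (fun res i => PySem.Int.floordiv (res * (n - k + i)) i) 1

def number_of_solutions_partitioning_gen_alt (nr_ways : Int) (nr_partitions : Int) (count_intermediate : Bool) : Int :=
  let total := pvBinom (nr_ways - 1) (nr_partitions - 1)
  if count_intermediate = true ∧ 2 ≤ nr_partitions ∧ nr_partitions + 2 ≤ nr_ways then
    total + pvBinom (nr_ways - 3) (nr_partitions - 2)
  else total

-- ===== PRECONDITION & SPEC =====
-- Pre_ excludes nr_partitions > nr_ways (both A's and B's asserts raise AssertionError) and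
-- nr_partitions < 1, where A either exceeds Python's recursion limit (RecursionError) or, in the
-- degenerate base cases, returns values (1, or nr_partitions itself, possibly negative) that are
-- not partition counts; B asserts 1 <= nr_partitions <= nr_ways and raises AssertionError there.
def Pre_number_of_solutions_partitioning_gen (nr_ways : Int) (nr_partitions : Int) (count_intermediate : Bool) : Prop :=
  1 ≤ nr_partitions ∧ nr_partitions ≤ nr_ways
instance (nr_ways : Int) (nr_partitions : Int) (count_intermediate : Bool) : Decidable (Pre_number_of_solutions_partitioning_gen nr_ways nr_partitions count_intermediate) := by unfold Pre_number_of_solutions_partitioning_gen; infer_instance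

def pvWitness_number_of_solutions_partitioning_gen : Int × Int × Bool := (7, 3, true)

def Spec_number_of_solutions_partitioning_gen (nr_ways : Int) (nr_partitions : Int) (count_intermediate : Bool) (out : Int) : Prop := out = number_of_solutions_partitioning_gen_alt nr_ways nr_partitions count_intermediate
instance (nr_ways : Int) (nr_partitions : Int) (count_intermediate : Bool) (out : Int) : Decidable (Spec_number_of_solutions_partitioning_gen nr_ways nr_partitions count_intermediate out) := by unfold Spec_number_of_solutions_partitioning_gen; infer_instance

-- ===== CLAIM (what is proved, stated in full; the proofs are below) =====
def Claim_equal_number_of_solutions_partitioning_gen : Prop := ∀ (nr_ways : Int) (nr_partitions : Int) (count_intermediate : Bool), Dom_number_of_solutions_partitioning_gen nr_ways nr_partitions count_intermediate → Pre_number_of_solutions_partitioning_gen nr_ways nr_partitions count_intermediate → Spec_number_of_solutions_partitioning_gen nr_ways nr_partitions count_intermediate (number_of_solutions_partitioning_gen nr_ways nr_partitions count_intermediate)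

-- ===== LEMMAS AND PROOFS =====

-- the common mathematical value: C(w-1,p-1) + (intermediate nodes) C(w-3,p-2)
def pvM (w p : Int) (ci : Bool) : Int :=
  ((w - 1).toNat.choose (p - 1).toNat : Int) +
  (if ci = true ∧ 2 ≤ p ∧ p + 2 ≤ w then ((w - 3).toNat.choose (p - 2).toNat : Int) else 0)

-- hockey stick
theorem pv_hockey (k : Nat) : ∀ (n : Nat), ∑ j ∈ Finset.range n, (k + j).choose k = (k + n).choose (k + 1) := by
  intro n
  induction n with
  | zero => simp [Nat.choose_eq_zero_of_lt (Nat.lt_succ_self k)]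
  | succ m ih =>
    rw [Finset.sum_range_succ, ih, show k + (m + 1) = (k + m) + 1 from by omega]
    have h := Nat.choose_succ_succ (k + m) k
    simp only [Nat.succ_eq_add_one] at h
    omega

-- a 0/1-guarded range sum collapses to the shorter range
theorem pv_sum_ite_lt (f : Nat → Int) (m : Nat) : ∀ (d : Nat),
    ∑ j ∈ Finset.range (m + d), (if j < m then f j else 0) = ∑ j ∈ Finset.range m, f j := by
  intro d
  induction d with
  | zero => exact Finset.sum_congr rfl (fun j hj => if_pos (Finset.mem_range.mp hj))
  | succ e ih =>
    rw [show m + (e + 1) = (m + e) + 1 from rfl, Finset.sum_range_succ, ih,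
        if_neg (by omega), add_zero]

-- the binomial loop computes Nat.choose
theorem pvBinom_loop (n k : Int) (hk : 0 ≤ k) (hn : k ≤ n) :
    ∀ (t : Nat), t ≤ k.toNat →
      (PySem.List.pyRange 1 ((t : Int) + 1) 1).foldl
        (fun res i => PySem.Int.floordiv (res * (n - k + i)) i) 1
      = ((n.toNat - k.toNat + t).choose t : Int) := by
  intro t
  induction t with
  | zero => simp [PySem.List.pyRange_one_eq_nil]
  | succ s ih =>
    intro hs
    have h1 : ((s + 1 : Nat) : Int) + 1 = ((s : Int) + 1) + 1 := by push_cast; ring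
    rw [h1, PySem.List.pyRange_one_succ_right (by omega), List.foldl_append,
        ih (by omega)]
    simp only [List.foldl_cons, List.foldl_nil]
    have hval : n - k + ((s : Int) + 1) = ((n.toNat - k.toNat + s + 1 : Nat) : Int) := by omega
    rw [hval]
    have hch : (n.toNat - k.toNat + s).choose s * (n.toNat - k.toNat + s + 1)
        = (n.toNat - k.toNat + s + 1).choose (s + 1) * (s + 1) := by
      have h := Nat.succ_mul_choose_eq (n.toNat - k.toNat + s) s
      simp only [Nat.succ_eq_add_one] at h
      rw [mul_comm]
      exact h
    have hmul : ((n.toNat - k.toNat + s).choose s : Int) * ((n.toNat - k.toNat + s + 1 : Nat) : Int)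
        = ((n.toNat - k.toNat + s + 1).choose (s + 1) : Int) * ((s : Int) + 1) := by
      exact_mod_cast congrArg (fun (x : Nat) => (x : Int)) hch
    rw [hmul, PySem.Int.floordiv_eq_ediv_of_pos (by omega),
        Int.mul_ediv_cancel _ (by omega)]
    have hfin : n.toNat - k.toNat + (s + 1) = n.toNat - k.toNat + s + 1 := by omega
    rw [hfin]

theorem pvBinom_eq (n k : Int) (hk : 0 ≤ k) (hn : k ≤ n) :
    pvBinom n k = (n.toNat.choose k.toNat : Int) := by
  unfold pvBinom
  rw [if_neg (by omega)]
  have hkc : (k.toNat : Int) = k := by omega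
  have h := pvBinom_loop n k hk hn k.toNat le_rfl
  rw [hkc] at h
  rw [h]
  have hfin : n.toNat - k.toNat + k.toNat = n.toNat := by omega
  rw [hfin]

theorem pv_alt_eq (w p : Int) (ci : Bool) (h1 : 1 ≤ p) (h2 : p ≤ w) :
    number_of_solutions_partitioning_gen_alt w p ci = pvM w p ci := by
  unfold number_of_solutions_partitioning_gen_alt pvM
  rw [pvBinom_eq (w - 1) (p - 1) (by omega) (by omega)]
  by_cases hc : ci = true ∧ 2 ≤ p ∧ p + 2 ≤ w
  · rw [if_pos hc, if_pos hc, pvBinom_eq (w - 3) (p - 2) (by omega) (by omega)]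
  · rw [if_neg hc, if_neg hc, add_zero]

-- foldl of an accumulating sum over pyRange 1 (n+1) 1 is a Finset.range sum
theorem pv_foldl_sum (f : Int → Int) (init : Int) :
    ∀ (n : Nat), (PySem.List.pyRange 1 ((n : Int) + 1) 1).foldl (fun acc i => acc + f i) init
      = init + ∑ j ∈ Finset.range n, f ((j : Int) + 1) := by
  intro n
  induction n with
  | zero => simp [PySem.List.pyRange_one_eq_nil]
  | succ m ih =>
    have h1 : ((m + 1 : Nat) : Int) + 1 = ((m : Int) + 1) + 1 := by push_cast; ring
    rw [h1, PySem.List.pyRange_one_succ_right (by omega), List.foldl_append, ih]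
    simp [Finset.sum_range_succ]
    ring

-- main induction: A's recursion computes pvM on the admitted domain
theorem pvGoA_eq (ci : Bool) : ∀ (fuel : Nat) (w p : Int), 1 ≤ p → p ≤ w → p.toNat ≤ fuel →
    pvGoA fuel w p ci = pvM w p ci := by
  intro fuel
  induction fuel with
  | zero => intro w p h1 _ hf; omega
  | succ f ih =>
    intro w p h1 h2 hf
    unfold pvGoA
    by_cases hb1 : p = 1 ∨ w = p
    · rw [if_pos hb1]
      unfold pvM
      rcases hb1 with h | h
      · subst h
        rw [if_neg (by omega)]
        norm_num
      · subst h
        rw [if_neg (by omega)]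
        simp [Nat.choose_self]
    · rw [if_neg hb1]
      push_neg at hb1
      obtain ⟨hp1, hwp⟩ := hb1
      have hp2 : 2 ≤ p := by omega
      by_cases hb2 : w = p + 1
      · rw [if_pos hb2]
        subst hb2
        unfold pvM
        rw [if_neg (by omega), add_zero]
        have h3 : (p + 1 - 1).toNat = p.toNat := by omega
        have h4 : (p - 1).toNat = p.toNat - 1 := by omega
        rw [h3, h4, Nat.choose_symm (by omega), Nat.choose_one_right]
        omega
      · rw [if_neg hb2]
        have hw2 : p + 2 ≤ w := by omega
        set n : Nat := (w - p + 1).toNat with hn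
        have hrange : w - (p - 1) + 1 = (n : Int) + 1 := by omega
        rw [hrange, pv_foldl_sum]
        have hsum : ∀ j ∈ Finset.range n,
            pvGoA f (w - ((j : Int) + 1)) (p - 1) ci = pvM (w - ((j : Int) + 1)) (p - 1) ci := by
          intro j hj
          have hj' : (j : Nat) < n := Finset.mem_range.mp hj
          exact ih (w - ((j : Int) + 1)) (p - 1) (by omega) (by omega) (by omega)
        rw [Finset.sum_congr rfl hsum]
        simp only [pvM]
        rw [Finset.sum_add_distrib]
        have hpart1 : ∑ j ∈ Finset.range n, ((w - ((j : Int) + 1) - 1).toNat.choose ((p - 1) - 1).toNat : Int)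
            = ((w - 1).toNat.choose (p - 1).toNat : Int) := by
          have hcongr : ∀ j ∈ Finset.range n,
              ((w - ((j : Int) + 1) - 1).toNat.choose ((p - 1) - 1).toNat : Int)
              = (fun t => ((((p - 2).toNat + t).choose (p - 2).toNat : Nat) : Int)) (n - 1 - j) := by
            intro j hj
            have hj' : j < n := Finset.mem_range.mp hj
            simp only
            congr 2 <;> omega
          rw [Finset.sum_congr rfl hcongr,
              Finset.sum_range_reflect (fun t => ((((p - 2).toNat + t).choose (p - 2).toNat : Nat) : Int)) n,
              ← Nat.cast_sum, pv_hockey]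
          congr 2 <;> omega
        rw [hpart1]
        have hpart2 : (if ci = true then (1 : Int) else 0)
            + ∑ j ∈ Finset.range n, (if ci = true ∧ 2 ≤ p - 1 ∧ (p - 1) + 2 ≤ w - ((j : Int) + 1)
                then ((w - ((j : Int) + 1) - 3).toNat.choose ((p - 1) - 2).toNat : Int) else 0)
            = (if ci = true ∧ 2 ≤ p ∧ p + 2 ≤ w then ((w - 3).toNat.choose (p - 2).toNat : Int) else 0) := by
          by_cases hci : ci = true
          · rw [if_pos hci, if_pos ⟨hci, hp2, hw2⟩]
            by_cases hp3 : 3 ≤ p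
            · set m : Nat := (w - p - 1).toNat with hm
              have hmn : n = m + (n - m) := by omega
              have hsplit : ∀ j ∈ Finset.range n,
                  (if ci = true ∧ 2 ≤ p - 1 ∧ (p - 1) + 2 ≤ w - ((j : Int) + 1)
                    then ((w - ((j : Int) + 1) - 3).toNat.choose ((p - 1) - 2).toNat : Int) else 0)
                  = (if j < m then (fun t => ((((p - 3).toNat + (t + 1)).choose (p - 3).toNat : Nat) : Int)) (m - 1 - j) else 0) := by
                intro j hj
                have hj' : j < n := Finset.mem_range.mp hj
                by_cases hjm : j < m
                · rw [if_pos ⟨hci, by omega, by omega⟩, if_pos hjm]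
                  simp only
                  congr 2 <;> omega
                · rw [if_neg (by omega), if_neg hjm]
              rw [Finset.sum_congr rfl hsplit, hmn,
                  pv_sum_ite_lt (fun j => (fun t => ((((p - 3).toNat + (t + 1)).choose (p - 3).toNat : Nat) : Int)) (m - 1 - j)) m (n - m),
                  Finset.sum_range_reflect (fun t => ((((p - 3).toNat + (t + 1)).choose (p - 3).toNat : Nat) : Int)) m]
              have hsucc := Finset.sum_range_succ' (fun t => ((((p - 3).toNat + t).choose (p - 3).toNat : Nat) : Int)) m
              simp only [Nat.add_zero, Nat.choose_self, Nat.cast_one] at hsucc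
              rw [add_comm (1 : Int), ← hsucc, ← Nat.cast_sum, pv_hockey]
              congr 2 <;> omega
            · have hp2' : p = 2 := by omega
              have hz : ∀ j ∈ Finset.range n,
                  (if ci = true ∧ 2 ≤ p - 1 ∧ (p - 1) + 2 ≤ w - ((j : Int) + 1)
                    then ((w - ((j : Int) + 1) - 3).toNat.choose ((p - 1) - 2).toNat : Int) else 0) = 0 := by
                intro j hj
                rw [if_neg (by omega)]
              rw [Finset.sum_congr rfl hz, Finset.sum_const_zero, add_zero]
              have h0 : (p - 2).toNat = 0 := by omega
              rw [h0, Nat.choose_zero_right]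
              norm_num
          · have hz : ∀ j ∈ Finset.range n,
                (if ci = true ∧ 2 ≤ p - 1 ∧ (p - 1) + 2 ≤ w - ((j : Int) + 1)
                  then ((w - ((j : Int) + 1) - 3).toNat.choose ((p - 1) - 2).toNat : Int) else 0) = 0 := by
              intro j hj
              rw [if_neg (by simp [hci])]
            rw [Finset.sum_congr rfl hz, Finset.sum_const_zero]
            simp [hci]
        rw [← hpart2]
        ring

-- ===== VERDICT (by name: the statement is the Claim_ definition above) =====
theorem number_of_solutions_partitioning_gen_spec : Claim_equal_number_of_solutions_partitioning_gen := by
  intro w p ci _ hpre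
  obtain ⟨h1, h2⟩ := hpre
  unfold Spec_number_of_solutions_partitioning_gen number_of_solutions_partitioning_gen
  rw [pvGoA_eq ci p.toNat w p h1 h2 le_rfl, pv_alt_eq w p ci h1 h2]
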